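-- pv_equiv track=rewrite | github.com/jmwerner/recipes | website_generator/webpageGenerator.py | recipe_categories_exist
-- ===== SOURCE A (Python) =====
-- def recipe_categories_exist(ingredients_list, recipe_name):
--     if 'category' not in list(ingredients_list[0].keys()):
--         # Accomodation for older versions of the recipe input app
--         categories_exist = False
--     else:
--         all_categories = []
--         for i in range(0, len(ingredients_list)):
--             if ingredients_list[i]['number'] != ['']:
--                 all_categories.append(ingredients_list[i]['category'][0])
--         unique_categories = list(set(all_categories))
--         if '' in unique_categories:
--             if len(unique_categories) > 1:
--                 raise ValueError('Not all categories were filled in for ' + \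
--                     recipe_name)
--             else:
--                 categories_exist = False
--         else:
--             categories_exist = True
--     return categories_exist
-- ===== SOURCE B (Python) =====
-- def recipe_categories_exist(ingredients_list, recipe_name):
--     if 'category' not in ingredients_list[0]:
--         # Accomodation for older versions of the recipe input app
--         return False
--     saw_empty = False
--     saw_nonempty = False
--     for item in ingredients_list:
--         if item['number'] != ['']:
--             if item['category'][0] == '':
--                 saw_empty = True
--             else:
--                 saw_nonempty = True
--     if saw_empty and saw_nonempty:
--         raise ValueError('Not all categories were filled in for ' + recipe_name)
--     return not saw_empty
-- ===== Notes on version B (the rewrite author's own statement) =====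
-- stated objective: simpler
-- what changed: Replaces the index loop that collects every category into a list and then deduplicates it with set() by a single pass that only maintains two booleans (saw an empty category / saw a non-empty one), so no intermediate list or set is built.
import Mathlib
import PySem

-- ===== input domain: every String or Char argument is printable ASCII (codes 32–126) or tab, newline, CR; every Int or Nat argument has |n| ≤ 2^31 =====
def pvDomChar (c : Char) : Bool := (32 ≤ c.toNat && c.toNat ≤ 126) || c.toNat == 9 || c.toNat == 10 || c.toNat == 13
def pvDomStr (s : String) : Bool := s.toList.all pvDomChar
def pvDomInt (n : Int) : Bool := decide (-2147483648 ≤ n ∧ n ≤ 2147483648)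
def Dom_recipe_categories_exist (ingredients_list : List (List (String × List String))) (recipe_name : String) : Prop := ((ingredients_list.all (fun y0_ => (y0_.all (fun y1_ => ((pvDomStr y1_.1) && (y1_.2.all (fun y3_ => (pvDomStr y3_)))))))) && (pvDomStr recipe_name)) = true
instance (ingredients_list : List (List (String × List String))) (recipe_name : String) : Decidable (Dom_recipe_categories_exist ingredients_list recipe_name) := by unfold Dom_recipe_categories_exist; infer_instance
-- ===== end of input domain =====

-- B replaces A's append-loop plus set-deduplication by a single pass keeping just two
-- booleans (saw an empty / saw a non-empty category); return values agree on all of Pre_.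

-- ===== PORT A =====
def recipe_categories_exist (ingredients_list : List (List (String × List String))) (recipe_name : String) : Bool :=
  -- ingredients_list[0] (IndexError on [] excluded by Pre_)
  let first := PySem.List.pyGetD ingredients_list 0 []
  if ¬ ((PySem.Dict.ofList first).keys.contains "category") then
    false
  else
    -- for i in range(0, len(ingredients_list)): …
    let all_categories : List String :=
      (PySem.List.pyRange 0 ingredients_list.length 1).foldl (fun acc i =>
        let d := PySem.Dict.ofList (PySem.List.pyGetD ingredients_list i [])
        if d.getD "number" [] ≠ [""] then
          acc ++ [PySem.List.pyGetD (d.getD "category" []) 0 ""]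
        else acc) []
    let unique_categories := PySem.Set.ofList all_categories
    if unique_categories.contains "" then
      if PySem.Set.len unique_categories > 1 then
        false  -- Python raises ValueError here; excluded by Pre_
      else
        false
    else
      true

-- ===== PORT B =====
-- one structural pass over the list, threading the two flags (saw_empty, saw_nonempty)
def pvCatScan : List (List (String × List String)) → Bool → Bool → Bool × Bool
  | [], saw_empty, saw_nonempty => (saw_empty, saw_nonempty)
  | item :: rest, saw_empty, saw_nonempty =>
    let d := PySem.Dict.ofList item
    if d.getD "number" [] ≠ [""] then
      if PySem.List.pyGetD (d.getD "category" []) 0 "" = "" then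
        pvCatScan rest true saw_nonempty
      else
        pvCatScan rest saw_empty true
    else
      pvCatScan rest saw_empty saw_nonempty

def recipe_categories_exist_alt (ingredients_list : List (List (String × List String))) (recipe_name : String) : Bool :=
  let first := PySem.List.pyGetD ingredients_list 0 []
  if ¬ (PySem.Dict.ofList first).contains "category" then
    false
  else
    let flags := pvCatScan ingredients_list false false
    if flags.1 && flags.2 then
      false  -- Python raises ValueError here; excluded by Pre_
    else
      !flags.1

-- ===== PRECONDITION & SPEC =====
-- Pre_ excludes exactly the inputs on which the Python raises: the empty list (IndexError),
-- items missing the 'number' key or a qualifying item with missing/empty 'category'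
-- (KeyError/IndexError) when the first dict has the 'category' key, and a mix of empty and
-- non-empty categories (ValueError).
def Pre_recipe_categories_exist (ingredients_list : List (List (String × List String))) (recipe_name : String) : Prop :=
  ingredients_list ≠ [] ∧
  ("category" ∈ (PySem.Dict.ofList (PySem.List.pyGetD ingredients_list 0 [])).keys →
    (∀ item ∈ ingredients_list,
      (PySem.Dict.ofList item).contains "number" = true ∧
      ((PySem.Dict.ofList item).getD "number" [] ≠ [""] →
        (PySem.Dict.ofList item).getD "category" [] ≠ [])) ∧
    ¬ (∃ x ∈ ingredients_list, ∃ y ∈ ingredients_list,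
        (PySem.Dict.ofList x).getD "number" [] ≠ [""] ∧
        (PySem.Dict.ofList y).getD "number" [] ≠ [""] ∧
        PySem.List.pyGetD ((PySem.Dict.ofList x).getD "category" []) 0 "" = "" ∧
        PySem.List.pyGetD ((PySem.Dict.ofList y).getD "category" []) 0 "" ≠ ""))
instance (ingredients_list : List (List (String × List String))) (recipe_name : String) : Decidable (Pre_recipe_categories_exist ingredients_list recipe_name) := by unfold Pre_recipe_categories_exist; infer_instance

def pvWitness_recipe_categories_exist : (List (List (String × List String))) × String :=
  ([[("category", ["veg"]), ("number", ["2"])]], "stew")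

def Spec_recipe_categories_exist (ingredients_list : List (List (String × List String))) (recipe_name : String) (out : Bool) : Prop := out = recipe_categories_exist_alt ingredients_list recipe_name
instance (ingredients_list : List (List (String × List String))) (recipe_name : String) (out : Bool) : Decidable (Spec_recipe_categories_exist ingredients_list recipe_name out) := by unfold Spec_recipe_categories_exist; infer_instance

-- ===== CLAIM (what is proved, stated in full; the proofs are below) =====
def Claim_equal_recipe_categories_exist : Prop := ∀ (ingredients_list : List (List (String × List String))) (recipe_name : String), Dom_recipe_categories_exist ingredients_list recipe_name → Pre_recipe_categories_exist ingredients_list recipe_name → Spec_recipe_categories_exist ingredients_list recipe_name (recipe_categories_exist ingredients_list recipe_name)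

-- ===== LEMMAS AND PROOFS =====

-- A's append loop produces exactly the mapped filter of qualifying items.
theorem foldl_append_if_eq {α β : Type} (p : α → Prop) [DecidablePred p] (f : α → β) (l : List α) (init : List β) :
    l.foldl (fun acc x => if p x then acc ++ [f x] else acc) init
      = init ++ (l.filter (fun x => decide (p x))).map f := by
  induction l generalizing init with
  | nil => simp
  | cons h t ih =>
    by_cases hp : p h <;> simp [List.foldl_cons, hp, ih, List.append_assoc]

-- B's two-flag scan computes (se ∨ some qualifying item is empty, sn ∨ some is non-empty).
theorem pvCatScan_eq (l : List (List (String × List String))) (se sn : Bool) :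
    pvCatScan l se sn
      = (se || l.any (fun item => decide ((PySem.Dict.ofList item).getD "number" [] ≠ [""]) &&
            decide (PySem.List.pyGetD ((PySem.Dict.ofList item).getD "category" []) 0 "" = "")),
         sn || l.any (fun item => decide ((PySem.Dict.ofList item).getD "number" [] ≠ [""]) &&
            !(decide (PySem.List.pyGetD ((PySem.Dict.ofList item).getD "category" []) 0 "" = "")))) := by
  induction l generalizing se sn with
  | nil => simp [pvCatScan]
  | cons h t ih =>
    by_cases hq : (PySem.Dict.ofList h).getD "number" [] = [""]
    · simp [pvCatScan, hq, ih]
    · by_cases he : PySem.List.pyGetD ((PySem.Dict.ofList h).getD "category" []) 0 "" = "" <;>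
        simp [pvCatScan, hq, he, ih]

-- membership in A's category list ↔ a qualifying item with that category value
theorem mem_cats_iff (l : List (List (String × List String))) (c : String) :
    (c ∈ (l.filter (fun x => decide ((PySem.Dict.ofList x).getD "number" [] ≠ [""]))).map
        (fun item => PySem.List.pyGetD ((PySem.Dict.ofList item).getD "category" []) 0 ""))
      ↔ ∃ x ∈ l, (PySem.Dict.ofList x).getD "number" [] ≠ [""] ∧
          PySem.List.pyGetD ((PySem.Dict.ofList x).getD "category" []) 0 "" = c := by
  simp only [List.mem_map, List.mem_filter, decide_eq_true_eq]
  tauto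

-- ===== VERDICT (by name: the statement is the Claim_ definition above) =====
theorem recipe_categories_exist_spec : Claim_equal_recipe_categories_exist := by
  intro il rn _hdom hpre
  obtain ⟨hne, himpl⟩ := hpre
  unfold Spec_recipe_categories_exist recipe_categories_exist recipe_categories_exist_alt
  by_cases hc : ("category" ∈ (PySem.Dict.ofList (PySem.List.pyGetD il 0 [])).keys)
  case neg =>
    have h2 : ((PySem.Dict.ofList (PySem.List.pyGetD il 0 [])).contains "category") = false := by
      rw [← Bool.not_eq_true, PySem.Dict.contains_iff_mem_keys]; exact hc
    simp [h2]
    exact fun h => absurd h hc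
  case pos =>
    have h1 : ((PySem.Dict.ofList (PySem.List.pyGetD il 0 [])).keys.contains "category") = true := by
      simp [hc]
    have h2 : ((PySem.Dict.ofList (PySem.List.pyGetD il 0 [])).contains "category") = true := by
      rw [PySem.Dict.contains_iff_mem_keys]; exact hc
    simp only [h1, h2, not_true_eq_false, if_neg, not_false_iff]
    -- rewrite A's indexed loop into a fold over the list itself, then into filter+map
    rw [PySem.List.foldl_pyRange_zero_pyGetD' il []
      (fun acc item =>
        if (PySem.Dict.ofList item).getD "number" [] ≠ [""] then
          acc ++ [PySem.List.pyGetD ((PySem.Dict.ofList item).getD "category" []) 0 ""]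
        else acc) []]
    rw [foldl_append_if_eq (fun item => (PySem.Dict.ofList item).getD "number" [] ≠ [""])
      (fun item => PySem.List.pyGetD ((PySem.Dict.ofList item).getD "category" []) 0 "") il []]
    rw [pvCatScan_eq il false false]
    set cats := ((il.filter
      (fun x => decide ((PySem.Dict.ofList x).getD "number" [] ≠ [""]))).map
      (fun item => PySem.List.pyGetD ((PySem.Dict.ofList item).getD "category" []) 0 ""))
      with hcats
    simp only [List.nil_append, Bool.false_or]
    by_cases hmem : ("" ∈ cats)
    case pos =>
      -- B's saw_empty flag is true, and A's '"" in unique_categories' test fires: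
      -- both returns collapse to false
      have hany : il.any (fun item => decide ((PySem.Dict.ofList item).getD "number" [] ≠ [""]) &&
          decide (PySem.List.pyGetD ((PySem.Dict.ofList item).getD "category" []) 0 "" = "")) = true := by
        obtain ⟨x, hx, hqx, hcx⟩ := (mem_cats_iff il "").mp (hcats ▸ hmem)
        rw [List.any_eq_true]
        exact ⟨x, hx, by simp [hqx, hcx]⟩
      simp only [ne_eq, decide_not] at hany
      simp [hmem, hany]
    case neg =>
      -- B's saw_empty flag is false and A's membership test fails: both return true
      have hEf : ¬ (∃ x ∈ il, ¬ (PySem.Dict.ofList x).getD "number" [] = [""] ∧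
          PySem.List.pyGetD ((PySem.Dict.ofList x).getD "category" []) 0 "" = "") := by
        intro h
        exact hmem (hcats.symm ▸ (mem_cats_iff il "").mpr h)
      have hany : il.any (fun item => decide ((PySem.Dict.ofList item).getD "number" [] ≠ [""]) &&
          decide (PySem.List.pyGetD ((PySem.Dict.ofList item).getD "category" []) 0 "" = "")) = false := by
        rw [← Bool.not_eq_true, List.any_eq_true]
        rintro ⟨x, hx, hb⟩
        simp only [Bool.and_eq_true, decide_eq_true_eq] at hb
        exact hEf ⟨x, hx, hb.1, hb.2⟩
      simp only [ne_eq, decide_not] at hany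
      simp [hmem, hany]
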